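/- GENERATED by mk_final_copies.py from the proof of the farm's unit `codebook_decode_deinterleave_repeat.7` (farm:codebook_decode_deinterleave_repeat.7.2: Proof.lean) as the
   re-elaboration sweep compiled it — do not edit. -/
import Vorbis.Spec.Units.codebook_decode_deinterleave_repeat_7

open X86 X86.User Asan Vorbis Vorbis.Spec Vorbis.Spec.Deint

set_option maxRecDepth 4000
set_option maxHeartbeats 4000000

/-- Segment 7 of `codebook_decode_deinterleave_repeat` (`cut3` = 10DC9EH … `ret` at 10DCACH, stb_vorbis_fixed.c:1960 `}`:
`add rsp, 38H`, six pops, `ret`): from the assertion `Deint.AtEpilogue` (= `Mid` + the reader's post + the result in rax with the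
contract's two result clauses) to the function's `Returned`. The epilogue writes no memory and leaves rax alone, so the post is
the assertion's fields read through `w_mem` and `w_kept`. -/
theorem Vorbis.Spec.Worked.codebook_decode_deinterleave_repeat_7_ok : Vorbis.Spec.codebook_decode_deinterleave_repeat_7.Statement := by
  intro Lay hLay μ hμ u₀ hcode others frames Blk len ret e u hat
  -- 1. the assertion's fields, and those of the `Mid` it carries (the ENTRY state is `e`, the present state `u`)
  obtain ⟨hrip, hmid, hreader, hresult, hone, hzero⟩ := hat
  obtain ⟨he, hrsp, hra, h15, h14, h13, h12, hbp, hbx, hsame, hcodeok, hinv, hun⟩ := hmid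
  v_entry he
  -- 2. DF, the MXCSR masks, `SseOK` and the code span of the present state, under the forms the walker reads
  have hdf := hinv.1
  have hmx := hinv.2
  have hsse := Vorbis.sseOK_of_abiInv hinv
  have hspan : Mem.EqOn Vorbis.L.textLo Vorbis.L.textHi u₀.mem u.mem := hcodeok
  -- 3. / 4. the slots the pops and the `ret` load are `h15 … hbx`, `hra`; the walk: 10DC9EH `add rsp, 38H` … 10DCACH `ret`
  u_walk hcode [hμ.vendor] span [Vorbis.L.textLo, Vorbis.L.textHi] side (v_side)
  -- 5. the exit at the `ret`: `Returned … e ret`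
  refine ReachVia.done ?_
  v_returned
  · -- the post: rax and the memory are those of the cut point
    have hrax : s_10dcac.reg .rax = u.reg .rax := w_kept .rax rfl
    refine ⟨?_, ?_, ?_, ?_, ?_⟩
    · -- no shadow byte written since the entry (SH8)
      rw [w_mem]
      exact hun
    · -- the reader's post
      rw [w_mem]
      exact hreader
    · -- eax ∈ {0, 1}
      rw [hrax]
      exact hresult
    · -- result 1: CI holds of the two stored ints
      rw [hrax, w_mem]
      exact hone
    · -- result 0: the two ints are as at entry
      rw [hrax, w_mem]
      exact hzero
  · -- the callee-saved registers: six popped back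
    intro r hr
    cases r <;> first
      | (exact absurd hr (by decide))
      | (with_reducible assumption)
  · -- the footprint: the epilogue stores nothing
    rw [w_mem]
    exact hsame
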